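-- pv_equiv track=rewrite | github.com/pemariano/CalculationInterpreter | CalculationInterpreter.py | arruma
-- ===== SOURCE A (Python) =====
-- def prioridade(x):
--     if x == '=': return 0 # e o de menor?
--     elif x == '+': return 1
--     elif x == '-': return 1
--     elif x == '*': return 2
--     elif x == '/': return 2
--     elif x == '#': return 3
--     elif x == '_': return 3
--     elif x == '^': return 4
--     elif x == '(': return 5
--     elif x == ')': return 6
--     else: return None # nao e operador
--
-- def arruma(exp):
--     novo = []
--     # separa os elementos
--     exp = exp.replace("**","^")
--     k = 0
--     while k < len(exp):
--         if exp[k] == " ":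
--             k += 1
--             continue
--         elem = ""
--         # se nao e operador:
--         if prioridade(exp[k]) == None:
--             ind = True
--             while prioridade(exp[k]) == None and exp[k] != " " and ind:
--                 elem += exp[k]
--                 if k < len(exp) - 1:
--                     k += 1
--                 else:
--                     ind = False
--         # se e operador
--         elif prioridade(exp[k]) != None:
--             elem = exp[k]
--             ind = False
--         if elem != "":
--             novo.append(elem)
--         if ind != True:
--             k += 1
--     return novo
-- ===== SOURCE B (Python) =====
-- def arruma(exp):
--     ops = "=+-*/#_^()"
--     s = exp.replace("**", "^")
--     spaced = "".join(" " + c + " " if c in ops else c for c in s)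
--     return [t for t in spaced.split(" ") if t]
-- ===== Notes on version B (the rewrite author's own statement) =====
-- stated objective: idiomatic
-- what changed: After the same power-operator pre-pass, B pads every operator character with spaces and splits the string on spaces, dropping empty pieces, instead of A's manual index-advancing state machine with a nested operand-gathering while loop and an ind flag.
import Mathlib
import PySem

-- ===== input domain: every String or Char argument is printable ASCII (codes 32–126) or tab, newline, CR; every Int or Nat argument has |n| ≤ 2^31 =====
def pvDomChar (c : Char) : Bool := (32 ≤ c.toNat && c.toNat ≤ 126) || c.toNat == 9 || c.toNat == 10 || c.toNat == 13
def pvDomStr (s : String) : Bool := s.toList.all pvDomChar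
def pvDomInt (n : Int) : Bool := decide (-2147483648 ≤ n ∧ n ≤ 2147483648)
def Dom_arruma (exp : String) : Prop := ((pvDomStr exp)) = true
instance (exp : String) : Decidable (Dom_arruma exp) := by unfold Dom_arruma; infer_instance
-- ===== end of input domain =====

-- B replaces A's index-advancing state machine by the idiomatic pad-operators-with-spaces-then-split pipeline; same return value, no speed claim.

-- ===== PORT A =====
def prioridade (x : Char) : Option Int :=
  if x = '=' then some 0
  else if x = '+' then some 1
  else if x = '-' then some 1
  else if x = '*' then some 2
  else if x = '/' then some 2
  else if x = '#' then some 3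
  else if x = '_' then some 3
  else if x = '^' then some 4
  else if x = '(' then some 5
  else if x = ')' then some 6
  else none

-- inner while loop of A (the fuel argument only makes the recursion total; the fuel arruma passes never runs out)
def arrumaInner (cs : List Char) : Nat → Nat → List Char → List Char × Nat × Bool
  | 0, k, elem => (elem, k, false)
  | fuel+1, k, elem =>
    let c := cs.getD k ' '
    if prioridade c = none ∧ c ≠ ' ' then
      if k < cs.length - 1 then arrumaInner cs fuel (k+1) (elem ++ [c])
      else (elem ++ [c], k, false)
    else (elem, k, true)

-- outer while loop of A
def arrumaLoop (cs : List Char) : Nat → Nat → List String → List String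
  | 0, _, novo => novo
  | fuel+1, k, novo =>
    if k < cs.length then
      let c := cs.getD k ' '
      if c = ' ' then arrumaLoop cs fuel (k+1) novo
      else
        let r := if prioridade c = none then arrumaInner cs (fuel+1) k []
                 else ([c], k, false)
        let novo' := if r.1 ≠ [] then novo ++ [String.ofList r.1] else novo
        if r.2.2 = true then arrumaLoop cs fuel r.2.1 novo'
        else arrumaLoop cs fuel (r.2.1 + 1) novo'
    else novo

def arruma (exp : String) : List String :=
  let cs := (PySem.Str.replace exp "**" "^").toList
  arrumaLoop cs (cs.length + 1) 0 []

-- ===== PORT B =====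
def opsB : List Char := ['=', '+', '-', '*', '/', '#', '_', '^', '(', ')']

def arruma_alt (exp : String) : List String :=
  let s := PySem.Str.replace exp "**" "^"
  let spaced := PySem.Chars.join [] (s.toList.map (fun c => if opsB.contains c then [' ', c, ' '] else [c]))
  ((PySem.Chars.splitOn spaced [' ']).filter (fun w => w ≠ [])).map (fun w => String.ofList w)

-- ===== PRECONDITION & SPEC =====
def Spec_arruma (exp : String) (out : List String) : Prop := out = arruma_alt exp
instance (exp : String) (out : List String) : Decidable (Spec_arruma exp out) := by unfold Spec_arruma; infer_instance

-- ===== CLAIM (what is proved, stated in full; the proofs are below) =====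
def Claim_equal_arruma : Prop := ∀ (exp : String), Dom_arruma exp → Spec_arruma exp (arruma exp)

-- ===== LEMMAS AND PROOFS =====

def isWordC (c : Char) : Bool := (prioridade c).isNone && (c != ' ')

def tok : List Char → List (List Char)
  | [] => []
  | c :: t =>
    if c = ' ' then tok t
    else if (prioridade c).isSome then [c] :: tok t
    else ((c :: t).takeWhile isWordC) :: tok ((c :: t).dropWhile isWordC)
termination_by cs => cs.length
decreasing_by
  · simp
  · simp
  · rename_i h1 h2
    have hw : isWordC c = true := by
      simp [isWordC, Option.isNone_iff_eq_none]
      constructor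
      · cases h : prioridade c with
        | none => rfl
        | some v => exact absurd (by simp [h]) h2
      · exact h1
    simp [hw]
    exact List.length_dropWhile_le _ _

def splitSp : List Char → List (List Char)
  | [] => [[]]
  | c :: t => if c = ' ' then [] :: splitSp t else (splitSp t).modifyHead (c :: ·)

lemma splitSp_ne_nil (l : List Char) : splitSp l ≠ [] := by
  cases l with
  | nil => simp [splitSp]
  | cons c t =>
    simp only [splitSp]
    split
    · simp
    · cases h : splitSp t with
      | nil => exact absurd h (splitSp_ne_nil t)
      | cons a b => simp [List.modifyHead]

lemma splitOn_go_eq : ∀ (fuel : Nat) (l cur : List Char) (acc : List (List Char)) (h : l.length < fuel),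
    PySem.Chars.splitOn.go [' '] fuel l cur acc =
      acc.reverse ++ (splitSp l).modifyHead (cur.reverse ++ ·) := by
  intro fuel
  induction fuel with
  | zero => intro l cur acc h; omega
  | succ fuel ih =>
    intro l cur acc h
    cases l with
    | nil => simp [PySem.Chars.splitOn.go, splitSp]
    | cons c rest =>
      rw [PySem.Chars.splitOn.go]
      by_cases hc : c = ' '
      · have hp : [' '].isPrefixOf (c :: rest) = true := by simp [List.isPrefixOf, hc]
        simp only [hp, if_pos, List.length_cons, List.length_nil, List.drop_succ_cons, List.drop_zero]
        rw [ih rest [] (cur.reverse :: acc) (by simpa using Nat.lt_of_succ_lt_succ h)]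
        simp [splitSp, hc]
        cases hsp : splitSp rest with
        | nil => exact absurd hsp (splitSp_ne_nil rest)
        | cons a b => simp
      · have hp : [' '].isPrefixOf (c :: rest) = false := by simp [List.isPrefixOf]; exact fun e => hc e.symm
        simp only [hp]
        rw [if_neg (by simp)]
        rw [ih rest (c :: cur) acc (by simpa using Nat.lt_of_succ_lt_succ h)]
        simp [splitSp, hc]
        cases hsp : splitSp rest with
        | nil => exact absurd hsp (splitSp_ne_nil rest)
        | cons a b => simp [List.modifyHead]

lemma splitOn_eq_splitSp (l : List Char) : PySem.Chars.splitOn l [' '] = splitSp l := by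
  unfold PySem.Chars.splitOn
  rw [splitOn_go_eq (l.length + 1) l [] [] (by omega)]
  cases hsp : splitSp l with
  | nil => exact absurd hsp (splitSp_ne_nil l)
  | cons a b => simp

def hB (c : Char) : List Char := if opsB.contains c then [' ', c, ' '] else [c]

lemma contains_opsB (c : Char) : opsB.contains c = (prioridade c).isSome := by
  simp only [opsB, prioridade, List.contains_cons, List.contains_nil]
  by_cases h1 : c = '=' <;> by_cases h2 : c = '+' <;> by_cases h3 : c = '-' <;>
    by_cases h4 : c = '*' <;> by_cases h5 : c = '/' <;> by_cases h6 : c = '#' <;>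
    by_cases h7 : c = '_' <;> by_cases h8 : c = '^' <;> by_cases h9 : c = '(' <;>
    by_cases h10 : c = ')' <;> simp_all

lemma splitSp_word_append (w t : List Char) (hw : ∀ c ∈ w, c ≠ ' ') :
    splitSp (w ++ t) = (splitSp t).modifyHead (w ++ ·) := by
  induction w with
  | nil =>
    cases hsp : splitSp t with
    | nil => exact absurd hsp (splitSp_ne_nil t)
    | cons a b => simp [List.modifyHead, hsp]
  | cons c w ih =>
    have hc : c ≠ ' ' := hw c (by simp)
    simp only [List.cons_append, splitSp, if_neg hc]
    rw [ih (fun d hd => hw d (by simp [hd]))]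
    cases hsp : splitSp t with
    | nil => exact absurd hsp (splitSp_ne_nil t)
    | cons a b => simp [List.modifyHead]

lemma flatMap_word (w : List Char) (hw : ∀ c ∈ w, isWordC c = true) :
    w.flatMap hB = w := by
  induction w with
  | nil => simp
  | cons c w ih =>
    have := hw c (by simp)
    have hop : c ∉ opsB := by
      simp only [← List.contains_iff_mem, contains_opsB]
      simp [isWordC] at this
      simp [this.1]
    simp [hB, hop, ih (fun d hd => hw d (by simp [hd]))]

lemma B_eq_tok (cs : List Char) : (splitSp (cs.flatMap hB)).filter (· ≠ []) = tok cs := by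
  induction cs using tok.induct with
  | case1 => simp [splitSp, tok]
  | case2 t ih =>
    rw [tok]
    simp only [List.flatMap_cons]
    have : hB ' ' = [' '] := by decide
    rw [this]
    simp only [List.cons_append, List.nil_append, splitSp, if_pos rfl]
    simpa using ih
  | case3 c t hc hop ih =>
    rw [tok, if_neg hc, if_pos hop]
    have hcontains : opsB.contains c = true := by rw [contains_opsB, hop]
    simp only [List.flatMap_cons, hB, hcontains, if_pos, List.cons_append, List.nil_append]
    rw [show splitSp (' ' :: c :: ' ' :: t.flatMap hB) = [] :: [c] :: splitSp (t.flatMap hB) by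
      simp [splitSp, hc]]
    simp only [List.filter_cons]
    simpa using ih
  | case4 c t hc hop ih =>
    have hw : isWordC c = true := by
      simp [isWordC]
      exact ⟨Option.not_isSome_iff_eq_none.mp hop, hc⟩
    rw [tok, if_neg hc, if_neg hop]
    have hsplit : (c :: t).takeWhile isWordC ++ (c :: t).dropWhile isWordC = c :: t :=
      List.takeWhile_append_dropWhile
    set w := (c :: t).takeWhile isWordC with hwdef
    set rest := (c :: t).dropWhile isWordC with hrdef
    have hwall : ∀ d ∈ w, isWordC d = true := fun d hd => List.mem_takeWhile_imp hd
    have hwne : w ≠ [] := by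
      rw [hwdef]
      simp [List.takeWhile_cons, hw]
    have hflat : (c :: t).flatMap hB = w ++ rest.flatMap hB := by
      conv_lhs => rw [← hsplit]
      rw [List.flatMap_append, flatMap_word w hwall]
    have hwns : ∀ d ∈ w, d ≠ ' ' := by
      intro d hd
      have := hwall d hd
      simp [isWordC] at this
      exact this.2
    rw [hflat]
    cases hrest : rest with
    | nil =>
      simp only [List.flatMap_nil, List.append_nil]
      have hws := splitSp_word_append w [] hwns
      rw [List.append_nil] at hws
      rw [hws]
      simp only [splitSp, List.modifyHead, List.append_nil]
      simp [hwne, hrest, tok]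
    | cons d t' =>
      have e : List.dropWhile isWordC (c :: t) = d :: t' := by rw [← hrdef]; exact hrest
      have hd : isWordC d = false := by
        have hne : List.dropWhile isWordC (c :: t) ≠ [] := by rw [e]; simp
        have := List.head_dropWhile_not isWordC hne
        simp only [e] at this
        simpa using this
      have hBd : ∃ X0, hB d = ' ' :: X0 := by
        by_cases hds : d = ' '
        · exact ⟨[], by subst hds; decide⟩
        · have : opsB.contains d = true := by
            rw [contains_opsB]
            simp only [isWordC, Bool.and_eq_false_iff, bne_eq_false_iff_eq, hds, or_false,
              Option.isNone_eq_false_iff] at hd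
            exact hd
          exact ⟨[d, ' '], by simp [hB, List.contains_iff_mem.mp this]⟩
      obtain ⟨X0, hX0⟩ := hBd
      have hflat2 : (d :: t').flatMap hB = ' ' :: (X0 ++ t'.flatMap hB) := by
        simp [List.flatMap_cons, hX0]
      rw [hflat2, splitSp_word_append w _ hwns]
      rw [show splitSp (' ' :: (X0 ++ t'.flatMap hB)) = [] :: splitSp (X0 ++ t'.flatMap hB) by
        simp [splitSp]]
      simp only [List.modifyHead, List.append_nil, List.filter_cons]
      rw [hrest] at ih
      rw [hflat2] at ih
      rw [show splitSp (' ' :: (X0 ++ t'.flatMap hB)) = [] :: splitSp (X0 ++ t'.flatMap hB) by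
        simp [splitSp]] at ih
      simp only [List.filter_cons] at ih
      simp at ih ⊢
      simp [hwne, ih]

lemma isWordC_iff (c : Char) : isWordC c = true ↔ (prioridade c = none ∧ c ≠ ' ') := by
  simp [isWordC, Option.isNone_iff_eq_none]

lemma inner_spec (cs : List Char) : ∀ (fuel k : Nat) (elem : List Char),
    k < cs.length → cs.length - k ≤ fuel →
    arrumaInner cs fuel k elem =
      (elem ++ (cs.drop k).takeWhile isWordC,
       (if (cs.drop k).dropWhile isWordC = [] then cs.length - 1
        else k + ((cs.drop k).takeWhile isWordC).length),
       !((cs.drop k).dropWhile isWordC).isEmpty) := by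
  intro fuel
  induction fuel with
  | zero => intro k elem hk hf; omega
  | succ fuel ih =>
    intro k elem hk hf
    have hdrop : cs.drop k = cs[k] :: cs.drop (k+1) := List.drop_eq_getElem_cons hk
    have hgetD : cs.getD k ' ' = cs[k] := List.getD_eq_getElem cs ' ' hk
    rw [arrumaInner]
    simp only [hgetD, hdrop]
    by_cases hw : isWordC cs[k] = true
    · have hcond := (isWordC_iff _).mp hw
      rw [if_pos hcond]
      by_cases hlt : k < cs.length - 1
      · rw [if_pos hlt]
        rw [ih (k+1) (elem ++ [cs[k]]) (by omega) (by omega)]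
        have hdrop1 : cs.drop (k+1) = List.drop (k+1) cs := rfl
        simp only [List.takeWhile_cons, List.dropWhile_cons, hw, if_pos]
        simp only [Prod.mk.injEq]
        refine ⟨by simp, ?_, by simp⟩
        split <;> simp <;> omega
      · rw [if_neg hlt]
        have hk1 : k = cs.length - 1 := by omega
        have hdrop2 : cs.drop (k+1) = [] := List.drop_eq_nil_of_le (by omega)
        rw [hdrop2]
        simp only [List.takeWhile_cons, List.dropWhile_cons, hw, if_pos]
        simp [hk1]
    · have hcond : ¬(prioridade cs[k] = none ∧ cs[k] ≠ ' ') := fun h => hw ((isWordC_iff _).mpr h)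
      rw [if_neg hcond]
      simp only [List.takeWhile_cons, List.dropWhile_cons, hw]
      simp
      omega

lemma loop_spec (cs : List Char) : ∀ (fuel k : Nat) (novo : List String),
    cs.length - k < fuel →
    arrumaLoop cs fuel k novo = novo ++ (tok (cs.drop k)).map String.ofList := by
  intro fuel
  induction fuel with
  | zero => intro k novo hf; omega
  | succ fuel ih =>
    intro k novo hf
    rw [arrumaLoop]
    by_cases hk : k < cs.length
    · have hdrop : cs.drop k = cs[k] :: cs.drop (k+1) := List.drop_eq_getElem_cons hk
      have hgetD : cs.getD k ' ' = cs[k] := List.getD_eq_getElem cs ' ' hk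
      rw [if_pos hk]
      simp only [hgetD]
      by_cases hsp : cs[k] = ' '
      · rw [if_pos hsp, ih (k+1) novo (by omega)]
        rw [hdrop, tok, if_pos hsp]
      · rw [if_neg hsp]
        by_cases hpri : prioridade cs[k] = none
        · -- operand case
          have hw : isWordC cs[k] = true := (isWordC_iff _).mpr ⟨hpri, hsp⟩
          have hinner := inner_spec cs (fuel+1) k [] hk (by omega)
          rw [if_pos hpri, hinner]
          have hwne : (cs.drop k).takeWhile isWordC ≠ [] := by
            rw [hdrop, List.takeWhile_cons, if_pos hw]
            simp
          by_cases hrest : (cs.drop k).dropWhile isWordC = []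
          · rw [hrest]
            simp only [List.isEmpty_nil, Bool.not_true, List.nil_append, if_pos, hwne,
              not_false_eq_true, Bool.false_eq_true, if_false]
            have hlen : cs.length - 1 + 1 = cs.length := by omega
            rw [if_pos hwne, hlen, ih cs.length _ (by omega), List.drop_length]
            conv_rhs => rw [hdrop, tok, if_neg hsp, if_neg (by simp [hpri])]
            rw [← hdrop, hrest, tok]
            simp
          · have hne : (!((cs.drop k).dropWhile isWordC).isEmpty) = true := by
              simp [List.isEmpty_iff, hrest]
            rw [hne]
            simp only [List.nil_append, if_pos, if_true]
            rw [if_neg hrest, if_pos hwne]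
            have hlw : 1 ≤ ((cs.drop k).takeWhile isWordC).length := by
              cases h : (cs.drop k).takeWhile isWordC with
              | nil => exact absurd h hwne
              | cons a b => simp
            have hlwle : ((cs.drop k).takeWhile isWordC).length ≤ cs.length - k := by
              calc ((cs.drop k).takeWhile isWordC).length ≤ (cs.drop k).length :=
                    List.IsPrefix.length_le (List.takeWhile_prefix isWordC)
                _ = cs.length - k := List.length_drop ..
            rw [ih (k + ((cs.drop k).takeWhile isWordC).length) _ (by omega)]
            have key : ∀ (tw dw : List Char), tw ++ dw = cs.drop k →
                cs.drop (k + tw.length) = dw := by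
              intro tw dw htd
              rw [← List.drop_drop, ← htd, List.drop_left]
            have hdropw : cs.drop (k + ((cs.drop k).takeWhile isWordC).length) =
                (cs.drop k).dropWhile isWordC :=
              key _ _ List.takeWhile_append_dropWhile
            rw [hdropw]
            conv_rhs => rw [hdrop, tok, if_neg hsp, if_neg (by simp [hpri])]
            rw [← hdrop]
            simp
        · -- operator case
          rw [if_neg hpri]
          simp only [List.cons_ne_nil, not_false_eq_true, if_pos,
            Bool.false_eq_true, if_false]
          rw [if_pos (by simp), ih (k+1) _ (by omega)]
          conv_rhs => rw [hdrop, tok, if_neg hsp, if_pos (by simp [Option.isSome_iff_ne_none, hpri])]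
          simp
    · rw [if_neg hk]
      rw [List.drop_eq_nil_of_le (by omega), tok]
      simp

lemma join_nil_flatten (l : List (List Char)) : PySem.Chars.join [] l = l.flatten := by
  induction l with
  | nil => rfl
  | cons a t ih =>
    cases t with
    | nil => simp [PySem.Chars.join, List.intercalate]
    | cons b u =>
      simp [PySem.Chars.join, List.intercalate] at ih ⊢
      simpa using ih

theorem arruma_eq_alt (exp : String) : arruma exp = arruma_alt exp := by
  unfold arruma arruma_alt
  simp only []
  rw [loop_spec _ _ 0 [] (by omega)]
  rw [join_nil_flatten, ← List.flatMap_def]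
  rw [show (fun c => if opsB.contains c then [' ', c, ' '] else [c]) = hB from rfl]
  rw [splitOn_eq_splitSp, B_eq_tok]
  simp

-- ===== VERDICT (by name: the statement is the Claim_ definition above) =====
theorem arruma_spec : Claim_equal_arruma := by
  intro exp _
  unfold Spec_arruma
  exact arruma_eq_alt exp
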